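-- pv_equiv track=rewrite | github.com/naterosenfeld08/ProteinPredictor | gui/structure_view.py | _has_backbone_atoms
-- ===== SOURCE A (Python) =====
-- def _has_backbone_atoms(pdb_text: str) -> bool:
--     """True when N/CA/C backbone atoms are present in ATOM/HETATM records."""
--     names: set[str] = set()
--     for line in pdb_text.splitlines():
--         if not (line.startswith("ATOM") or line.startswith("HETATM")):
--             continue
--         atom_name = line[12:16].strip().upper() if len(line) >= 16 else ""
--         if atom_name:
--             names.add(atom_name)
--             if {"N", "CA", "C"}.issubset(names):
--                 return True
--     return False
-- ===== SOURCE B (Python) =====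
-- def _has_backbone_atoms(pdb_text: str) -> bool:
--     """True when N/CA/C backbone atoms are present in ATOM/HETATM records."""
--     lines = pdb_text.splitlines()
--
--     def present(target):
--         for line in lines:
--             if not (line.startswith("ATOM") or line.startswith("HETATM")):
--                 continue
--             if len(line) >= 16 and line[12:16].strip().upper() == target:
--                 return True
--         return False
--
--     return present("N") and present("CA") and present("C")
-- ===== Notes on version B (the rewrite author's own statement) =====
-- stated objective: alternative
-- what changed: Replaces the single accumulating pass with a growing set and subset test by three independent early-exit scans, one per required backbone name, with no set maintained.
import Mathlib
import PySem

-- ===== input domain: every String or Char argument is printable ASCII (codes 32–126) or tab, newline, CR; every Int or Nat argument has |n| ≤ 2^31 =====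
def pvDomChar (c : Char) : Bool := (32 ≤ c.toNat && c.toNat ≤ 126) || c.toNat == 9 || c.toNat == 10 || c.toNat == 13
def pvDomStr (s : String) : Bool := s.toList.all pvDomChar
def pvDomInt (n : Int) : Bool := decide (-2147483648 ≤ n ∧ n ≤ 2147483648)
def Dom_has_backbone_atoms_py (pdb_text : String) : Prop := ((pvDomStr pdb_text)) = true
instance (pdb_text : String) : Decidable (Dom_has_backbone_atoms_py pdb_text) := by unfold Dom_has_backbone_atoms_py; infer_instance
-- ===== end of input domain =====

-- B replaces A's single accumulating pass (set + subset test) by three independent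
-- early-exit scans, one per required backbone name; same results, similar cost.


-- ===== PORT A =====
-- the for-loop of A: carries the accumulated set of atom names, early-returns on subset
def hbLoopA : List String → PySem.Set String → Bool
| [], _ => false
| line :: rest, names =>
  if ¬ (PySem.Str.startswith line "ATOM" || PySem.Str.startswith line "HETATM") then
    hbLoopA rest names
  else
    let atom_name :=
      if 16 ≤ PySem.Str.len line then
        PySem.Str.upper (PySem.Str.strip (PySem.Str.slice line (some 12) (some 16)))
      else ""
    if atom_name ≠ "" then
      let names' := PySem.Set.add names atom_name
      if PySem.Set.issubset (PySem.Set.ofList ["N", "CA", "C"]) names' then true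
      else hbLoopA rest names'
    else hbLoopA rest names

def has_backbone_atoms_py (pdb_text : String) : Bool :=
  hbLoopA (PySem.Str.splitlines pdb_text) PySem.Set.empty

-- ===== PORT B =====
-- one early-exit scan of the lines for a single target name
def hbPresent : List String → String → Bool
| [], _ => false
| line :: rest, target =>
  if ¬ (PySem.Str.startswith line "ATOM" || PySem.Str.startswith line "HETATM") then
    hbPresent rest target
  else if decide (16 ≤ PySem.Str.len line) &&
          (PySem.Str.upper (PySem.Str.strip (PySem.Str.slice line (some 12) (some 16))) == target) then
    true
  else hbPresent rest target

def has_backbone_atoms_py_alt (pdb_text : String) : Bool :=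
  let lines := PySem.Str.splitlines pdb_text
  hbPresent lines "N" && hbPresent lines "CA" && hbPresent lines "C"

-- ===== PRECONDITION & SPEC =====
def Spec_has_backbone_atoms_py (pdb_text : String) (out : Bool) : Prop := out = has_backbone_atoms_py_alt pdb_text
instance (pdb_text : String) (out : Bool) : Decidable (Spec_has_backbone_atoms_py pdb_text out) := by unfold Spec_has_backbone_atoms_py; infer_instance

-- ===== CLAIM (what is proved, stated in full; the proofs are below) =====
def Claim_equal_has_backbone_atoms_py : Prop := ∀ (pdb_text : String), Dom_has_backbone_atoms_py pdb_text → Spec_has_backbone_atoms_py pdb_text (has_backbone_atoms_py pdb_text)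

-- ===== LEMMAS AND PROOFS =====

lemma hb_subset_eq (names : PySem.Set String) :
    PySem.Set.issubset (PySem.Set.ofList ["N", "CA", "C"]) names =
      (PySem.Set.contains names "N" && PySem.Set.contains names "CA" && PySem.Set.contains names "C") := by
  rw [Bool.eq_iff_iff]
  simp only [PySem.Set.issubset_iff, PySem.Set.mem_ofList, Bool.and_eq_true, PySem.Set.contains_iff]
  constructor
  · intro hall
    exact ⟨⟨hall "N" (by simp), hall "CA" (by simp)⟩, hall "C" (by simp)⟩
  · rintro ⟨⟨h1, h2⟩, h3⟩ x hx
    simp only [List.mem_cons, List.not_mem_nil, or_false] at hx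
    rcases hx with rfl | rfl | rfl <;> assumption

lemma hb_contains_add (s : PySem.Set String) (x t : String) :
    PySem.Set.contains (PySem.Set.add s x) t = (PySem.Set.contains s t || (x == t)) := by
  rw [Bool.eq_iff_iff]
  simp only [PySem.Set.contains_iff, PySem.Set.mem_add, Bool.or_eq_true, beq_iff_eq]
  exact or_congr Iff.rfl eq_comm

lemma hb_if_or (b p : Bool) : (if b = true then true else p) = (b || p) := by
  cases b <;> simp

lemma hb_loop_eq (lines : List String) (names : PySem.Set String)
    (h : PySem.Set.issubset (PySem.Set.ofList ["N", "CA", "C"]) names = false) :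
    hbLoopA lines names =
      ((PySem.Set.contains names "N" || hbPresent lines "N") &&
       (PySem.Set.contains names "CA" || hbPresent lines "CA") &&
       (PySem.Set.contains names "C" || hbPresent lines "C")) := by
  induction lines generalizing names with
  | nil =>
    have hc := hb_subset_eq names
    rw [h] at hc
    simp only [hbLoopA, hbPresent, Bool.or_false]
    exact hc.symm ▸ rfl
  | cons line rest ih =>
    simp only [hbLoopA, hbPresent]
    cases hrec : (PySem.Str.startswith line "ATOM" || PySem.Str.startswith line "HETATM") with
    | false => simp only [Bool.false_eq_true, not_false_eq_true, if_true]; exact ih names h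
    | true =>
      simp only [not_true_eq_false, if_false]
      by_cases hlen : 16 ≤ PySem.Str.len line
      · simp only [hlen, if_true, decide_true, Bool.true_and]
        set s := PySem.Str.upper (PySem.Str.strip (PySem.Str.slice line (some 12) (some 16))) with hs
        by_cases hne : s = ""
        · rw [hne]
          simp only [ne_eq, not_true_eq_false, if_false, show (("" : String) == "N") = false from rfl,
            show (("" : String) == "CA") = false from rfl, show (("" : String) == "C") = false from rfl,
            Bool.false_eq_true, if_false]
          exact ih names h
        · simp only [ne_eq, hne, not_false_eq_true, if_true]
          by_cases hsub : PySem.Set.issubset (PySem.Set.ofList ["N", "CA", "C"]) (PySem.Set.add names s) = true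
          · rw [if_pos hsub]
            have hc := (hb_subset_eq (PySem.Set.add names s)).symm.trans hsub
            simp only [hb_contains_add, Bool.and_eq_true, Bool.or_eq_true] at hc
            obtain ⟨⟨h1, h2⟩, h3⟩ := hc
            symm
            simp only [hb_if_or, Bool.and_eq_true, Bool.or_eq_true]
            refine ⟨⟨?_, ?_⟩, ?_⟩
            · rcases h1 with h1 | h1
              · exact Or.inl h1
              · exact Or.inr (Or.inl h1)
            · rcases h2 with h2 | h2
              · exact Or.inl h2
              · exact Or.inr (Or.inl h2)
            · rcases h3 with h3 | h3
              · exact Or.inl h3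
              · exact Or.inr (Or.inl h3)
          · rw [if_neg hsub]
            rw [ih (PySem.Set.add names s) (Bool.eq_false_iff.mpr hsub)]
            simp only [hb_contains_add, hb_if_or, Bool.or_assoc]
      · simp only [hlen, if_false, ne_eq, not_true_eq_false, decide_false, Bool.false_and,
          Bool.false_eq_true]
        exact ih names h

-- ===== VERDICT (by name: the statement is the Claim_ definition above) =====
theorem has_backbone_atoms_py_spec : Claim_equal_has_backbone_atoms_py := by
  intro pdb_text _
  unfold Spec_has_backbone_atoms_py has_backbone_atoms_py has_backbone_atoms_py_alt
  rw [hb_loop_eq _ _ (by decide)]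
  simp [PySem.Set.contains, PySem.Set.empty]
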